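-- pv_equiv track=rewrite | github.com/kknyapple/Algorithm | 백준/Bronze/17618. 신기한 수/신기한 수.py | f
-- ===== SOURCE A (Python) =====
-- def f(n):
--     cnt = 0
--     for i in range(1, n + 1):
--         num = i
--         digit_sum = 0
--
--         while num > 0:
--             digit_sum += num % 10
--             num //= 10
--
--         if i % digit_sum == 0:
--             cnt += 1
--
--     return cnt
-- ===== SOURCE B (Python) =====
-- def f(n):
--     # Process numbers in blocks of ten sharing a prefix p: the digit sum of
--     # 10*p + d is digitsum(p) + d, so the digit-sum loop runs once per ten numbers.
--     cnt = 0
--     for p in range(0, n // 10 + 1):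
--         s = 0
--         q = p
--         while q > 0:
--             s += q % 10
--             q //= 10
--         base = 10 * p
--         for d in range(10):
--             i = base + d
--             if 1 <= i <= n and i % (s + d) == 0:
--                 cnt += 1
--     return cnt
-- ===== Notes on version B (the rewrite author's own statement) =====
-- stated objective: faster
-- what changed: B iterates over ten-digit blocks sharing a prefix p, computing the digit sum once per prefix and using digitsum(10p+d)=digitsum(p)+d, so the digit-extraction while-loop runs once per ten candidates instead of once per candidate.
import Mathlib
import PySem

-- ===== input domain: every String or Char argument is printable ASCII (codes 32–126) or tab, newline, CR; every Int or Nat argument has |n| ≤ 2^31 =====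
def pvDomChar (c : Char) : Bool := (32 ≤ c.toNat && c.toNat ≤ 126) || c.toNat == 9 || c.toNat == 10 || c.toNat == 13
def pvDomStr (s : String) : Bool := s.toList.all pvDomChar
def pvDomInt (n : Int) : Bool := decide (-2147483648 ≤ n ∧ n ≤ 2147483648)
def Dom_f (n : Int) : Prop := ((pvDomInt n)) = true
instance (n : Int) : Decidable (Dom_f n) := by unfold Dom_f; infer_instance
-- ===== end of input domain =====

-- B processes numbers in blocks of ten sharing a prefix, so the digit-sum loop runs once per
-- ten candidates instead of once per candidate (objective: faster, constant factor).

-- ===== PORT A =====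
-- A's inner `while num > 0: digit_sum += num % 10; num //= 10` loop, state (num, digit_sum)
def dsLoopA (num acc : Int) : Int :=
  if 0 < num then dsLoopA (PySem.Int.floordiv num 10) (acc + PySem.Int.mod num 10) else acc
termination_by num.toNat
decreasing_by
  rw [PySem.Int.floordiv_eq_ediv_of_pos (by norm_num)]; omega

def f (n : Int) : Int :=
  (PySem.List.pyRange 1 (n + 1) 1).foldl
    (fun cnt i =>
      let digit_sum := dsLoopA i 0
      if PySem.Int.mod i digit_sum = 0 then cnt + 1 else cnt) 0

-- ===== PORT B =====
-- B's `while q > 0: s += q % 10; q //= 10` loop, state (q, s)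
def dsLoopB (q s : Int) : Int :=
  if 0 < q then dsLoopB (PySem.Int.floordiv q 10) (s + PySem.Int.mod q 10) else s
termination_by q.toNat
decreasing_by
  rw [PySem.Int.floordiv_eq_ediv_of_pos (by norm_num)]; omega

def f_alt (n : Int) : Int :=
  (PySem.List.pyRange 0 (PySem.Int.floordiv n 10 + 1) 1).foldl
    (fun cnt p =>
      let s := dsLoopB p 0
      let base := 10 * p
      (PySem.List.pyRange 0 10 1).foldl
        (fun cnt d =>
          let i := base + d
          if 1 ≤ i ∧ i ≤ n ∧ PySem.Int.mod i (s + d) = 0 then cnt + 1 else cnt) cnt) 0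

-- ===== PRECONDITION & SPEC =====
def Spec_f (n : Int) (out : Int) : Prop := out = f_alt n
instance (n : Int) (out : Int) : Decidable (Spec_f n out) := by unfold Spec_f; infer_instance

-- ===== CLAIM (what is proved, stated in full; the proofs are below) =====
def Claim_equal_f : Prop := ∀ (n : Int), Dom_f n → Spec_f n (f n)

-- ===== LEMMAS AND PROOFS =====

theorem dsLoopB_eq_dsLoopA (q s : Int) : dsLoopB q s = dsLoopA q s := by
  induction q, s using dsLoopB.induct with
  | case1 q s h ih => rw [dsLoopB, dsLoopA, if_pos h, if_pos h]; exact ih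
  | case2 q s h => rw [dsLoopB, dsLoopA, if_neg h, if_neg h]

theorem dsLoopA_acc (q s : Int) : dsLoopA q s = dsLoopA q 0 + s := by
  by_cases h : 0 < q
  · rw [dsLoopA, if_pos h]
    rw [dsLoopA_acc (PySem.Int.floordiv q 10) (s + PySem.Int.mod q 10)]
    conv_rhs => rw [dsLoopA, if_pos h]
    rw [dsLoopA_acc (PySem.Int.floordiv q 10) (0 + PySem.Int.mod q 10)]
    ring
  · rw [dsLoopA, if_neg h]
    conv_rhs => rw [dsLoopA, if_neg h]
    ring
termination_by q.toNat
decreasing_by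
  all_goals rw [PySem.Int.floordiv_eq_ediv_of_pos (by norm_num)]; omega

-- the common counting predicate both programs decide for a candidate i
abbrev pvGood (n i : Int) : Prop := 1 ≤ i ∧ i ≤ n ∧ PySem.Int.mod i (dsLoopA i 0) = 0

-- digit sum of 10*p + d is digit sum of p plus d
theorem dsLoopA_shift (p d : Int) (_hp : 0 ≤ p) (hd0 : 0 ≤ d) (hd : d < 10)
    (hpos : 0 < 10 * p + d) : dsLoopA (10 * p + d) 0 = dsLoopA p 0 + d := by
  rw [dsLoopA, if_pos hpos]
  have hdiv : PySem.Int.floordiv (10 * p + d) 10 = p := by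
    rw [PySem.Int.floordiv_eq_ediv_of_pos (by norm_num)]; omega
  have hmod : PySem.Int.mod (10 * p + d) 10 = d := by
    rw [PySem.Int.mod_eq_emod_of_pos (by norm_num)]; omega
  rw [hdiv, hmod, dsLoopA_acc]; ring

-- the count of one block of ten, as a countP over the actual numbers
theorem block_count (n p : Int) (hp : 0 ≤ p) :
    (PySem.List.pyRange 0 10 1).countP
        (fun d => decide (1 ≤ 10 * p + d ∧ 10 * p + d ≤ n ∧
          PySem.Int.mod (10 * p + d) (dsLoopB p 0 + d) = 0))
      = (PySem.List.pyRange (10 * p) (10 * p + 10) 1).countP (fun i => decide (pvGood n i)) := by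
  have h1 : PySem.List.pyRange (10 * p) (10 * p + 10) 1
      = (PySem.List.pyRange 0 10 1).map (fun d => 10 * p + d) := by
    rw [PySem.List.pyRange_one, PySem.List.pyRange_one]
    simp [List.map_map, Function.comp_def]
  rw [h1, List.countP_map]
  apply List.countP_congr
  intro d hd
  have hd' := (PySem.List.mem_pyRange_one).1 hd
  simp only [Function.comp_apply, decide_eq_true_eq, pvGood]
  constructor
  · rintro ⟨h1', h2', h3'⟩
    refine ⟨h1', h2', ?_⟩
    rw [dsLoopA_shift p d hp hd'.1 hd'.2 (by omega), ← dsLoopB_eq_dsLoopA]; exact h3'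
  · rintro ⟨h1', h2', h3'⟩
    refine ⟨h1', h2', ?_⟩
    rw [dsLoopB_eq_dsLoopA, ← dsLoopA_shift p d hp hd'.1 hd'.2 (by omega)]; exact h3'

-- concatenating the blocks: the per-block counts over p < j sum to the count over [0, 10*j)
theorem blocks_sum (n : Int) (j : Nat) :
    ((PySem.List.pyRange 0 (j : Int) 1).map
        (fun p => ((PySem.List.pyRange (10 * p) (10 * p + 10) 1).countP
          (fun i => decide (pvGood n i)) : Int))).sum
      = ((PySem.List.pyRange 0 (10 * (j : Int)) 1).countP (fun i => decide (pvGood n i)) : Int) := by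
  induction j with
  | zero => simp [PySem.List.pyRange_one_eq_nil]
  | succ m ih =>
    rw [show ((m + 1 : Nat) : Int) = (m : Int) + 1 by push_cast; ring,
      PySem.List.pyRange_one_succ_right (by positivity),
      show 10 * ((m : Int) + 1) = 10 * (m : Int) + 10 by ring,
      PySem.List.pyRange_one_append 0 (10 * (m : Int)) (10 * (m : Int) + 10)
        (by positivity) (by omega)]
    rw [List.map_append, List.sum_append, ih, List.countP_append]
    push_cast
    simp

theorem f_alt_eq_count (n : Int) :
    f_alt n = ((PySem.List.pyRange 0 (10 * (PySem.Int.floordiv n 10 + 1)) 1).countP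
      (fun i => decide (pvGood n i)) : Int) := by
  unfold f_alt
  rw [PySem.List.foldl_congr_mem _ _
    (fun cnt p => cnt + ((PySem.List.pyRange (10 * p) (10 * p + 10) 1).countP
      (fun i => decide (pvGood n i)) : Int)) _
    (by
      intro acc p hp
      have hp' := (PySem.List.mem_pyRange_one).1 hp
      simp only
      rw [PySem.List.foldl_ite_add_one, block_count n p hp'.1])]
  rw [PySem.List.foldl_add]
  by_cases h : 0 ≤ PySem.Int.floordiv n 10 + 1
  · have hK : (PySem.Int.floordiv n 10 + 1)
        = (((PySem.Int.floordiv n 10 + 1).toNat : Nat) : Int) := by omega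
    rw [hK, blocks_sum n]
    simp
  · rw [PySem.List.pyRange_one_eq_nil (by omega), PySem.List.pyRange_one_eq_nil (by omega)]
    simp

theorem f_eq_count (n : Int) :
    f n = ((PySem.List.pyRange 1 (n + 1) 1).countP (fun i => decide (pvGood n i)) : Int) := by
  unfold f
  rw [PySem.List.foldl_congr_mem _ _
    (fun cnt i => if pvGood n i then cnt + 1 else cnt) _
    (by
      intro acc i hi
      have hi' := (PySem.List.mem_pyRange_one).1 hi
      simp only
      refine if_congr ?_ rfl rfl
      unfold pvGood
      constructor
      · intro h; exact ⟨hi'.1, by omega, h⟩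
      · rintro ⟨_, _, h⟩; exact h)]
  rw [PySem.List.foldl_ite_add_one]
  simp

-- ===== VERDICT (by name: the statement is the Claim_ definition above) =====
theorem f_spec : Claim_equal_f := by
  intro n _
  unfold Spec_f
  rw [f_eq_count, f_alt_eq_count]
  by_cases hn : 0 ≤ n
  · have hK : n + 1 ≤ 10 * (PySem.Int.floordiv n 10 + 1) := by
      rw [PySem.Int.floordiv_eq_ediv_of_pos (by norm_num)]
      omega
    have hz : (PySem.List.pyRange (n + 1) (10 * (PySem.Int.floordiv n 10 + 1)) 1).countP
        (fun i => decide (pvGood n i)) = 0 := by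
      rw [List.countP_eq_zero]
      intro i hi
      have hi' := (PySem.List.mem_pyRange_one).1 hi
      simp only [pvGood, decide_eq_true_eq]
      rintro ⟨_, h2, _⟩; omega
    conv_rhs => rw [PySem.List.pyRange_one_append 0 (n + 1)
      (10 * (PySem.Int.floordiv n 10 + 1)) (by omega) hK]
    rw [List.countP_append, hz]
    conv_rhs => rw [PySem.List.pyRange_one_cons (show (0 : Int) < n + 1 by omega)]
    rw [List.countP_cons]
    norm_num [pvGood]
  · rw [PySem.List.pyRange_one_eq_nil (by omega),
      PySem.List.pyRange_one_eq_nil (by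
        rw [PySem.Int.floordiv_eq_ediv_of_pos (by norm_num)]; omega)]
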